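-- pv_equiv track=rewrite | github.com/daxcy/Winc-Academy | Module 2 Functions Loops Conditionals/for/main.py | alphabet_set
-- ===== SOURCE A (Python) =====
-- def alphabet_set(list_of_countries):
--     letters_needed = [] # set to 0 before start loop
--     alphabet_countries = []
--     alphabet = ['a','b','c','d','e','f','g','i','j','k','l','m','n','o','p','q','r','s','t','u','v','w','x','y','z']
--     for country in list_of_countries:
--         for vowel in country:
--             if vowel.lower() not in letters_needed and vowel.lower() in alphabet:
--                 letters_needed.append(vowel.lower())
--                 if country not in alphabet_countries:
--                     alphabet_countries.append(country)
--
--     return alphabet_countries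
-- ===== SOURCE B (Python) =====
-- def alphabet_set(list_of_countries):
--     # Two staged passes: for each alphabet letter find the FIRST country containing it,
--     # then keep the countries (in order) that are first for at least one letter.
--     firsts = set()
--     for letter in "abcdefgijklmnopqrstuvwxyz":
--         for i, country in enumerate(list_of_countries):
--             if letter in country.lower():
--                 firsts.add(i)
--                 break
--     return [country for i, country in enumerate(list_of_countries) if i in firsts]
-- ===== Notes on version B (the rewrite author's own statement) =====
-- stated objective: alternative
-- what changed: Replaces A's single pass with a threaded seen-letters list and per-character membership scans by two staged passes: for each of the 25 alphabet letters find the index of the first country containing it, then emit the countries whose index was first for some letter.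
import Mathlib
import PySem

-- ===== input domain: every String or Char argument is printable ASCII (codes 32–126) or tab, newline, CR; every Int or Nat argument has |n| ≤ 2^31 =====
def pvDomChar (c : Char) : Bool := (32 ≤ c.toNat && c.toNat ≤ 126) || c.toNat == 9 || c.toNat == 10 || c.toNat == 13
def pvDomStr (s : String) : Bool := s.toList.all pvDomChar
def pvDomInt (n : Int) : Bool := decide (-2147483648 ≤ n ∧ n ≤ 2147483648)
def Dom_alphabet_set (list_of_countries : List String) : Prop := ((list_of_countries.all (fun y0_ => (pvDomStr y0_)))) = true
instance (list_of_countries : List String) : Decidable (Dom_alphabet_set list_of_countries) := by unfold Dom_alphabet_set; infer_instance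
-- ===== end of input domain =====

-- B replaces A's single pass with a threaded seen-letters list by two staged passes:
-- per alphabet letter, the index of the first country containing it; then emit the
-- countries whose index is first for some letter. Objective: alternative algorithm.

-- ===== PORT A =====
def alphabetA : List Char :=
  ['a','b','c','d','e','f','g','i','j','k','l','m','n','o','p','q','r','s','t','u','v','w','x','y','z']

def stepA (country : String) (st : List Char × List String) (v : Char) : List Char × List String :=
  let lv := PySem.Chars.lowerChar v
  if !st.1.contains lv && alphabetA.contains lv then
    (st.1 ++ [lv], if st.2.contains country then st.2 else st.2 ++ [country])
  else st

def alphabet_set (list_of_countries : List String) : List String :=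
  (list_of_countries.foldl (fun st country => country.toList.foldl (stepA country) st)
    (([] : List Char), ([] : List String))).2

-- ===== PORT B =====
-- 'letter in country.lower()': Python substring containment of a one-character string
def letterIn (letter : Char) (country : String) : Bool :=
  PySem.Str.isIn (String.ofList [letter]) (PySem.Str.lower country)

def altFirsts (list_of_countries : List String) : PySem.Set Int :=
  "abcdefgijklmnopqrstuvwxyz".toList.foldl (fun firsts letter =>
    match (PySem.List.enumerate list_of_countries).find? (fun p => letterIn letter p.2) with
    | some p => PySem.Set.add firsts p.1
    | none => firsts) PySem.Set.empty

def alphabet_set_alt (list_of_countries : List String) : List String :=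
  (PySem.List.enumerate list_of_countries).filterMap
    (fun p => if PySem.Set.contains (altFirsts list_of_countries) p.1 then some p.2 else none)

-- ===== PRECONDITION & SPEC =====
def Spec_alphabet_set (list_of_countries : List String) (out : List String) : Prop := out = alphabet_set_alt list_of_countries
instance (list_of_countries : List String) (out : List String) : Decidable (Spec_alphabet_set list_of_countries out) := by unfold Spec_alphabet_set; infer_instance

-- ===== CLAIM (what is proved, stated in full; the proofs are below) =====
def Claim_equal_alphabet_set : Prop := ∀ (list_of_countries : List String), Dom_alphabet_set list_of_countries → Spec_alphabet_set list_of_countries (alphabet_set list_of_countries)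

-- ===== LEMMAS AND PROOFS =====

-- the new alphabet letters contributed by a (lowered) character list, given letters `ls` already collected
def newL : List Char → List Char → List Char
  | [], _ => []
  | l :: rest, ls =>
    if !ls.contains l && alphabetA.contains l then l :: newL rest (ls ++ [l]) else newL rest ls

-- the common specification: select the countries contributing a new alphabet letter, threading `ls`
def selA : List Char → List String → List String
  | _, [] => []
  | ls, c :: cs =>
    if newL (c.toList.map PySem.Chars.lowerChar) ls = [] then selA ls cs
    else c :: selA (ls ++ newL (c.toList.map PySem.Chars.lowerChar) ls) cs

-- B-side index bookkeeping: the first index of a country whose lowered letters contain l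
def gN (xs : List String) (l : Char) : Option Nat :=
  xs.findIdx? (fun c => (c.toList.map PySem.Chars.lowerChar).contains l)

-- 'index i is the first for some alphabet letter outside ls'
def PB (xs : List String) (ls : List Char) (i : Int) : Bool :=
  alphabetA.any (fun l => !ls.contains l && ((gN xs l).map (fun k => (k : Int)) == some i))

lemma newL_eq_nil_iff (low : List Char) : ∀ ls : List Char,
    (newL low ls = [] ↔ ∀ l ∈ low, l ∈ alphabetA → l ∈ ls) := by
  induction low with
  | nil => intro ls; simp [newL]
  | cons l rest ih =>
    intro ls
    by_cases hls : l ∈ ls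
    · rw [show newL (l :: rest) ls = newL rest ls from by simp [newL, List.contains_eq_mem, hls]]
      rw [ih ls]
      constructor
      · intro h x hx hal
        rcases List.mem_cons.mp hx with hx | hx
        · subst hx; exact hls
        · exact h x hx hal
      · intro h x hx hal; exact h x (by simp [hx]) hal
    · by_cases hal : l ∈ alphabetA
      · rw [show newL (l :: rest) ls = l :: newL rest (ls ++ [l]) from by
          simp [newL, List.contains_eq_mem, hls, hal]]
        simp only [List.cons_ne_nil, false_iff]
        intro h
        exact hls (h l (by simp) hal)
      · rw [show newL (l :: rest) ls = newL rest ls from by simp [newL, List.contains_eq_mem, hal]]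
        rw [ih ls]
        constructor
        · intro h x hx hxa
          rcases List.mem_cons.mp hx with hx | hx
          · subst hx; exact absurd hxa hal
          · exact h x hx hxa
        · intro h x hx hal'; exact h x (by simp [hx]) hal'

lemma mem_newL (low : List Char) : ∀ (ls : List Char) (x : Char),
    x ∈ newL low ls ↔ x ∈ low ∧ x ∈ alphabetA ∧ x ∉ ls := by
  induction low with
  | nil => intro ls x; simp [newL]
  | cons l rest ih =>
    intro ls x
    by_cases hls : l ∈ ls
    · rw [show newL (l :: rest) ls = newL rest ls from by simp [newL, List.contains_eq_mem, hls]]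
      rw [ih ls x]
      constructor
      · rintro ⟨h1, h2, h3⟩; exact ⟨by simp [h1], h2, h3⟩
      · rintro ⟨h1, h2, h3⟩
        rcases List.mem_cons.mp h1 with h1 | h1
        · subst h1; exact absurd hls h3
        · exact ⟨h1, h2, h3⟩
    · by_cases hal : l ∈ alphabetA
      · rw [show newL (l :: rest) ls = l :: newL rest (ls ++ [l]) from by
          simp [newL, List.contains_eq_mem, hls, hal]]
        rw [List.mem_cons, ih (ls ++ [l]) x]
        simp only [List.mem_append, List.mem_cons]
        by_cases hxl : x = l
        · subst hxl; tauto
        · tauto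
      · rw [show newL (l :: rest) ls = newL rest ls from by simp [newL, List.contains_eq_mem, hal]]
        rw [ih ls x]
        by_cases hxl : x = l
        · subst hxl; simp [hal]
        · simp [hxl]

lemma innerA (country : String) : ∀ (chars : List Char) (ls : List Char) (acc : List String),
    chars.foldl (stepA country) (ls, acc) =
      (ls ++ newL (chars.map PySem.Chars.lowerChar) ls,
       if newL (chars.map PySem.Chars.lowerChar) ls = [] then acc
       else if acc.contains country then acc else acc ++ [country]) := by
  intro chars
  induction chars with
  | nil => intro ls acc; simp [newL]
  | cons c cs ih =>
    intro ls acc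
    rw [List.foldl_cons]
    by_cases hls : PySem.Chars.lowerChar c ∈ ls
    · have hstep : stepA country (ls, acc) c = (ls, acc) := by
        simp [stepA, List.contains_eq_mem, hls]
      rw [hstep, ih ls acc, show newL ((c :: cs).map PySem.Chars.lowerChar) ls
            = newL (cs.map PySem.Chars.lowerChar) ls from by
          simp [newL, List.contains_eq_mem, hls]]
    · by_cases hal : PySem.Chars.lowerChar c ∈ alphabetA
      · have hstep : stepA country (ls, acc) c =
            (ls ++ [PySem.Chars.lowerChar c],
             if acc.contains country then acc else acc ++ [country]) := by
          simp [stepA, List.contains_eq_mem, hls, hal]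
        have hnlc : newL ((c :: cs).map PySem.Chars.lowerChar) ls
            = PySem.Chars.lowerChar c :: newL (cs.map PySem.Chars.lowerChar) (ls ++ [PySem.Chars.lowerChar c]) := by
          simp [newL, List.contains_eq_mem, hls, hal]
        rw [hstep, hnlc]
        by_cases hm : country ∈ acc
        · rw [show (if acc.contains country = true then acc else acc ++ [country]) = acc from by
            simp [List.contains_eq_mem, hm]]
          rw [ih (ls ++ [PySem.Chars.lowerChar c]) acc]
          by_cases hnew : newL (cs.map PySem.Chars.lowerChar) (ls ++ [PySem.Chars.lowerChar c]) = [] <;>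
            simp [hnew, List.contains_eq_mem, hm, List.append_assoc]
        · rw [show (if acc.contains country = true then acc else acc ++ [country]) = acc ++ [country] from by
            simp [List.contains_eq_mem, hm]]
          rw [ih (ls ++ [PySem.Chars.lowerChar c]) (acc ++ [country])]
          by_cases hnew : newL (cs.map PySem.Chars.lowerChar) (ls ++ [PySem.Chars.lowerChar c]) = [] <;>
            simp [hnew, List.contains_eq_mem, hm, List.append_assoc]
      · have hstep : stepA country (ls, acc) c = (ls, acc) := by
          simp [stepA, List.contains_eq_mem, hal]
        rw [hstep, ih ls acc, show newL ((c :: cs).map PySem.Chars.lowerChar) ls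
              = newL (cs.map PySem.Chars.lowerChar) ls from by
            simp [newL, List.contains_eq_mem, hal]]

lemma foldA_eq : ∀ (countries : List String) (ls : List Char) (acc : List String),
    (∀ s ∈ acc, ∀ x ∈ s.toList.map PySem.Chars.lowerChar, x ∈ alphabetA → x ∈ ls) →
    (countries.foldl (fun st country => country.toList.foldl (stepA country) st) (ls, acc)).2
      = acc ++ selA ls countries := by
  intro countries
  induction countries with
  | nil => intro ls acc _; simp [selA]
  | cons country rest ih =>
    intro ls acc hinv
    rw [List.foldl_cons, innerA country country.toList ls acc]
    by_cases hnl : newL (country.toList.map PySem.Chars.lowerChar) ls = []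
    · rw [if_pos hnl, hnl, List.append_nil]
      rw [ih ls acc hinv, show selA ls (country :: rest) = selA ls rest from by simp [selA, hnl]]
    · rw [if_neg hnl]
      have hnc : country ∉ acc := by
        intro hmem
        exact hnl ((newL_eq_nil_iff _ ls).mpr (fun x hx hal => hinv country hmem x hx hal))
      rw [if_neg (by simp [List.contains_eq_mem, hnc])]
      rw [ih (ls ++ newL (country.toList.map PySem.Chars.lowerChar) ls) (acc ++ [country])
        (by
          intro s hs x hx hal
          rcases List.mem_append.mp hs with hs | hs
          · exact List.mem_append.mpr (Or.inl (hinv s hs x hx hal))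
          · have hsc : s = country := by simpa using hs
            subst hsc
            by_cases hxl : x ∈ ls
            · exact List.mem_append.mpr (Or.inl hxl)
            · exact List.mem_append.mpr (Or.inr ((mem_newL _ ls x).mpr ⟨hx, hal, hxl⟩)))]
      rw [show selA ls (country :: rest)
            = country :: selA (ls ++ newL (country.toList.map PySem.Chars.lowerChar) ls) rest from by
          simp [selA, hnl]]
      simp

lemma gN_cons (c : String) (cs : List String) (l : Char) :
    gN (c :: cs) l = if (c.toList.map PySem.Chars.lowerChar).contains l then some 0
      else (gN cs l).map (· + 1) := by
  simp [gN, List.findIdx?_cons]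

lemma letterIn_eq (l : Char) (c : String) :
    letterIn l c = (c.toList.map PySem.Chars.lowerChar).contains l := by
  have h : PySem.Chars.isIn [l] (PySem.Chars.lower c.toList) = true
      ↔ ((c.toList.map PySem.Chars.lowerChar).contains l = true) := by
    rw [PySem.Chars.isIn_iff_infix, List.singleton_infix_iff, List.contains_eq_mem]
    simp [PySem.Chars.lower]
  have hred : letterIn l c = PySem.Chars.isIn [l] (PySem.Chars.lower c.toList) := by
    simp [letterIn]
  rw [hred]
  by_cases hb : (c.toList.map PySem.Chars.lowerChar).contains l = true
  · rw [hb, h.mpr hb]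
  · rw [Bool.not_eq_true] at hb
    rw [hb, Bool.eq_false_iff]
    intro hc
    rw [h.mp hc] at hb
    cases hb

lemma find_enum (q : String → Bool) : ∀ (xs : List String) (st : Int),
    ((PySem.List.enumerate xs st).find? (fun p => q p.2)).map Prod.fst
      = (xs.findIdx? q).map (fun k => st + (k : Int)) := by
  intro xs
  induction xs with
  | nil => intro st; simp [PySem.List.enumerate]
  | cons c cs ih =>
    intro st
    rw [PySem.List.enumerate_cons, List.find?_cons, List.findIdx?_cons]
    by_cases hq : q c = true
    · simp [hq]
    · rw [Bool.not_eq_true] at hq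
      simp only [hq, if_neg Bool.false_ne_true]
      rw [ih (st + 1)]
      cases hfi : cs.findIdx? q with
      | none => simp
      | some k => simp; ring

lemma contains_add_int (s : PySem.Set Int) (x i : Int) :
    PySem.Set.contains (PySem.Set.add s x) i = (PySem.Set.contains s i || x == i) := by
  by_cases hx : x ∈ s
  · have he : PySem.Set.add s x = s := by
      simp [PySem.Set.add, PySem.Set.contains, List.contains_eq_mem, hx]
    rw [he]
    by_cases hxi : x = i
    · subst hxi; simp [PySem.Set.contains, List.contains_eq_mem, hx]
    · simp [beq_iff_eq, hxi]
  · have he : PySem.Set.add s x = s ++ [x] := by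
      simp [PySem.Set.add, PySem.Set.contains, List.contains_eq_mem, hx]
    rw [he]
    by_cases hxi : x = i
    · subst hxi; simp [PySem.Set.contains, List.contains_eq_mem]
    · simp [PySem.Set.contains, List.contains_eq_mem, beq_iff_eq, hxi, Ne.symm hxi]

lemma enum_shift {α : Type} (xs : List α) : ∀ s : Int,
    PySem.List.enumerate xs (s + 1) = (PySem.List.enumerate xs s).map (fun p => (p.1 + 1, p.2)) := by
  induction xs with
  | nil => intro s; simp [PySem.List.enumerate]
  | cons c cs ih =>
    intro s
    rw [PySem.List.enumerate_cons, PySem.List.enumerate_cons, List.map_cons, ih (s + 1)]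

lemma PB_zero (c : String) (cs : List String) (ls : List Char) :
    (PB (c :: cs) ls 0 = true) ↔ newL (c.toList.map PySem.Chars.lowerChar) ls ≠ [] := by
  rw [PB, List.any_eq_true]
  constructor
  · rintro ⟨l, hl, hb⟩
    rw [Bool.and_eq_true] at hb
    obtain ⟨hls, hbeq⟩ := hb
    rw [gN_cons] at hbeq
    by_cases hq : (c.toList.map PySem.Chars.lowerChar).contains l = true
    · intro hnil
      rw [newL_eq_nil_iff] at hnil
      have : l ∈ ls := hnil l (by rwa [List.contains_eq_mem, decide_eq_true_iff] at hq) hl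
      simp [List.contains_eq_mem, this] at hls
    · rw [Bool.not_eq_true] at hq
      rw [if_neg (by rw [hq]; simp)] at hbeq
      cases hfi : gN cs l with
      | none => rw [hfi] at hbeq; simp at hbeq
      | some j => rw [hfi] at hbeq; simp at hbeq; omega
  · intro hnil
    obtain ⟨x, hx⟩ := List.exists_mem_of_ne_nil _ hnil
    obtain ⟨hlow, hal, hls⟩ := (mem_newL _ ls x).mp hx
    refine ⟨x, hal, ?_⟩
    rw [Bool.and_eq_true]
    constructor
    · simp [List.contains_eq_mem, hls]
    · rw [gN_cons, if_pos (by simp [List.contains_eq_mem, hlow])]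
      simp

lemma PB_succ (c : String) (cs : List String) (ls : List Char) (k : Nat) :
    PB (c :: cs) ls ((k : Int) + 1)
      = PB cs (ls ++ newL (c.toList.map PySem.Chars.lowerChar) ls) ((k : Int)) := by
  unfold PB
  apply PySem.List.any_congr_mem
  intro l hl
  rw [gN_cons]
  by_cases hq : l ∈ c.toList.map PySem.Chars.lowerChar
  · rw [if_pos (by simp [List.contains_eq_mem, hq])]
    have h1 : ((some (0 : Nat)).map (fun k => (k : Int)) == some ((k : Int) + 1)) = false := by
      simp; omega
    rw [h1, Bool.and_false]
    by_cases hls : l ∈ ls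
    · have : (ls ++ newL (c.toList.map PySem.Chars.lowerChar) ls).contains l = true := by
        simp [List.contains_eq_mem, hls]
      rw [this]; simp
    · have hmem : l ∈ newL (c.toList.map PySem.Chars.lowerChar) ls :=
        (mem_newL _ ls l).mpr ⟨hq, hl, hls⟩
      have : (ls ++ newL (c.toList.map PySem.Chars.lowerChar) ls).contains l = true := by
        simp [List.contains_eq_mem, hmem]
      rw [this]; simp
  · rw [if_neg (by simp [List.contains_eq_mem, hq])]
    have hnm : l ∉ newL (c.toList.map PySem.Chars.lowerChar) ls := by
      intro hmem
      exact hq ((mem_newL _ ls l).mp hmem).1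
    have hcontains : (ls ++ newL (c.toList.map PySem.Chars.lowerChar) ls).contains l = ls.contains l := by
      by_cases hls : l ∈ ls <;> simp [List.contains_eq_mem, hls, hnm]
    rw [hcontains]
    congr 1
    cases hfi : gN cs l with
    | none => simp
    | some j =>
      simp only [Option.map_some]
      by_cases hjk : j = k
      · subst hjk; simp
      · have h1 : ¬ ((j : Int) + 1 = (k : Int) + 1) := by omega
        have h2 : ¬ ((j : Int) = (k : Int)) := by omega
        simp [h1, h2]

lemma gN_find (xs : List String) (l : Char) :
    ((PySem.List.enumerate xs).find? (fun p => letterIn l p.2)).map Prod.fst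
      = (gN xs l).map (fun k => (k : Int)) := by
  have h := find_enum (fun c => letterIn l c) xs 0
  simp only [letterIn_eq]
  simp only [letterIn_eq] at h
  rw [h]
  simp [gN]

lemma contains_fold (xs : List String) (i : Int) : ∀ (L : List Char) (s : PySem.Set Int),
    PySem.Set.contains (L.foldl (fun firsts letter =>
      match (PySem.List.enumerate xs).find? (fun p => letterIn letter p.2) with
      | some p => PySem.Set.add firsts p.1
      | none => firsts) s) i
    = (PySem.Set.contains s i
        || L.any (fun l => (gN xs l).map (fun k => (k : Int)) == some i)) := by
  intro L
  induction L with
  | nil => intro s; simp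
  | cons l L ih =>
    intro s
    rw [List.foldl_cons]
    cases hf : (PySem.List.enumerate xs).find? (fun p => letterIn l p.2) with
    | none =>
      have hg : (gN xs l).map (fun k => (k : Int)) = none := by
        rw [← gN_find, hf]; rfl
      simp only [List.any_cons, hg]
      rw [ih s]
      simp
    | some p =>
      have hg : (gN xs l).map (fun k => (k : Int)) = some p.1 := by
        rw [← gN_find, hf]; rfl
      simp only [List.any_cons, hg]
      rw [ih (PySem.Set.add s p.1), contains_add_int]
      have h2 : ((some p.1 : Option Int) == some i) = (p.1 == i) := rfl
      rw [h2, Bool.or_assoc]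

lemma contains_altFirsts (xs : List String) (i : Int) :
    PySem.Set.contains (altFirsts xs) i = PB xs [] i := by
  rw [altFirsts, contains_fold xs i]
  rw [show "abcdefgijklmnopqrstuvwxyz".toList = alphabetA from by decide]
  rw [show PySem.Set.contains (PySem.Set.empty : PySem.Set Int) i = false from rfl]
  rw [Bool.false_or, PB]
  apply PySem.List.any_congr_mem
  intro l _
  simp

lemma mainB : ∀ (xs : List String) (ls : List Char),
    (PySem.List.enumerate xs).filterMap (fun p => if PB xs ls p.1 then some p.2 else none)
      = selA ls xs := by
  intro xs
  induction xs with
  | nil => intro ls; simp [PySem.List.enumerate, selA]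
  | cons c cs ih =>
    intro ls
    rw [PySem.List.enumerate_cons]
    have htail : (PySem.List.enumerate cs (0 + 1)).filterMap
          (fun p => if PB (c :: cs) ls p.1 then some p.2 else none)
        = (PySem.List.enumerate cs).filterMap
          (fun p => if PB cs (ls ++ newL (c.toList.map PySem.Chars.lowerChar) ls) p.1
                    then some p.2 else none) := by
      rw [enum_shift cs 0, List.filterMap_map]
      apply List.filterMap_congr
      intro p hp
      obtain ⟨k, hk, hpe⟩ := (PySem.List.mem_enumerate_iff cs 0 p).mp hp
      subst hpe
      simp only [Function.comp]
      show (if PB (c :: cs) ls ((0 + (k : Int)) + 1) then some cs[k] else none)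
        = (if PB cs (ls ++ newL (c.toList.map PySem.Chars.lowerChar) ls) (0 + (k : Int))
           then some cs[k] else none)
      rw [show (0 + (k : Int)) = (k : Int) from by ring, PB_succ]
    by_cases hnl : newL (c.toList.map PySem.Chars.lowerChar) ls = []
    · have hPB : PB (c :: cs) ls 0 = false := by
        rw [Bool.eq_false_iff]
        intro h
        exact (PB_zero c cs ls).mp h hnl
      rw [List.filterMap_cons, htail, hnl, List.append_nil, ih ls]
      simp [hPB, selA, hnl]
    · have hPB : PB (c :: cs) ls 0 = true := (PB_zero c cs ls).mpr hnl
      rw [List.filterMap_cons, htail, ih (ls ++ newL (c.toList.map PySem.Chars.lowerChar) ls)]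
      simp [hPB, selA, hnl]

-- ===== VERDICT (by name: the statement is the Claim_ definition above) =====
theorem alphabet_set_spec : Claim_equal_alphabet_set := by
  intro xs _
  unfold Spec_alphabet_set alphabet_set alphabet_set_alt
  rw [foldA_eq xs [] [] (by intro s hs; simp at hs)]
  have hfun : (fun p : Int × String => if PySem.Set.contains (altFirsts xs) p.1 then some p.2 else none)
      = (fun p : Int × String => if PB xs [] p.1 then some p.2 else none) := by
    funext p; rw [contains_altFirsts]
  rw [hfun, mainB xs []]
  rfl
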